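-- pv_equiv track=rewrite | github.com/leihchen/leetcode | mac/karat.py | validMatrix
-- ===== SOURCE A (Python) =====
-- def validMatrix(matrix):  # all row and col contains [1, n]
--     n = len(matrix)
--     for i in range(n):
--         rowSet, colSet = set(), set()
--         rowMin = colMin = float('inf')
--         rowMax = colMax = float('-inf')
--         for j in range(n):
--             elem = matrix[i][j]
--             if elem in rowSet:
--                 return False
--             rowMax = max(rowMax, elem)
--             rowMin = min(rowMin, elem)
--
--             elem = matrix[j][i]
--             if elem in colSet:
--                 return False
--             colMax = max(colMax, elem)
--             colMin = min(colMin, elem)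
--         if colMax != n or rowMax != n or colMin != 1 or rowMin != 1:
--             return False
--     return True
-- ===== SOURCE B (Python) =====
-- def validMatrix(matrix):
--     n = len(matrix)
--     rows = [row[:n] for row in matrix]
--     cols = [[row[i] for row in rows] for i in range(n)]
--     def valid(seq):
--         return len(set(seq)) == n and min(seq) == 1 and max(seq) == n
--     return all(valid(s) for s in rows + cols)
-- ===== Notes on version B (the rewrite author's own statement) =====
-- stated objective: simpler
-- what changed: B builds explicit row/column lists once and checks each with a single valid(seq) helper (distinct count + min + max), replacing A's interleaved per-index scan with running min/max state, early exits, and a duplicate check against sets A never adds to.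
-- intended difference: On square matrices whose every row and column has min 1 and max n but where some row or column contains a duplicate, A returns True (its rowSet/colSet are never added to, so its duplicate check is dead code) while B returns False, which is the intended answer since such a line is not a permutation of 1..n. — e.g. on validMatrix([[1, 1, 3], [1, 3, 1], [3, 1, 1]]): A returns true, B returns false
-- outside the precondition, e.g. on validMatrix([[-3, -41, -2], [10], [2]]): A returns False, B raises IndexError
import Mathlib
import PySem

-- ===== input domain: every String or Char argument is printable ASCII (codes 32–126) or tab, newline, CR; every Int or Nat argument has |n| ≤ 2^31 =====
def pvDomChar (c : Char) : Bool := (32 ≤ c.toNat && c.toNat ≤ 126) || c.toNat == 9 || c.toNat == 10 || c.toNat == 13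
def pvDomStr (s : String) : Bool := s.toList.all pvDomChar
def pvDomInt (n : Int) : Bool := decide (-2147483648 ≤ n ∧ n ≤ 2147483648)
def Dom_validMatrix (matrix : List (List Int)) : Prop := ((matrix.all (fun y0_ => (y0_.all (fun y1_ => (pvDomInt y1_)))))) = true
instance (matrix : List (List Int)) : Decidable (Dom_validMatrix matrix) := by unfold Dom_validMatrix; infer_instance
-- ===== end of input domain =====

-- B replaces A's interleaved per-index scan (running min/max state, early exits, a duplicate
-- check against sets A never adds to) by building the row and column lists once and testing
-- each with one valid(seq) helper; B also rejects duplicated entries, which A silently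
-- accepts (see D_validMatrix below).

-- ===== PORT A =====
-- inner 'for j in range(n)' loop; result 'none' = A's 'return False'.  rowSet/colSet are
-- carried exactly as in A (A never adds to them, but the membership tests are transcribed).
-- rowMin = float('inf') etc. are the 'none' start of the Option accumulators: Python's
-- max(float('-inf'), e) = e is the 'none' branch, max/min of two ints the 'some' branch.
def vmInnerA (matrix : List (List Int)) (i : Nat) :
    List Nat → PySem.Set Int → PySem.Set Int →
    Option Int → Option Int → Option Int → Option Int →
    Option (Option Int × Option Int × Option Int × Option Int)
  | [], _, _, rMin, rMax, cMin, cMax => some (rMin, rMax, cMin, cMax)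
  | j :: js, rowSet, colSet, rMin, rMax, cMin, cMax =>
    match matrix[i]?.bind (fun r => r[j]?) with   -- matrix[i][j]; none = IndexError, outside Pre_
    | none => none
    | some e1 =>
      if PySem.Set.contains rowSet e1 then none
      else
        let rMax' := some (match rMax with | none => e1 | some m => max m e1)
        let rMin' := some (match rMin with | none => e1 | some m => min m e1)
        match matrix[j]?.bind (fun r => r[i]?) with   -- matrix[j][i]
        | none => none
        | some e2 =>
          if PySem.Set.contains colSet e2 then none
          else
            let cMax' := some (match cMax with | none => e2 | some m => max m e2)
            let cMin' := some (match cMin with | none => e2 | some m => min m e2)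
            vmInnerA matrix i js rowSet colSet rMin' rMax' cMin' cMax'

-- outer 'for i in range(n)' loop with the end-of-row check and the early 'return False's
def vmOuterA (matrix : List (List Int)) : List Nat → Bool
  | [] => true
  | i :: is =>
    match vmInnerA matrix i (List.range matrix.length)
        PySem.Set.empty PySem.Set.empty none none none none with
    | none => false
    | some (rMin, rMax, cMin, cMax) =>
      if (cMax != some (matrix.length : Int)) || (rMax != some (matrix.length : Int)) ||
         (cMin != some 1) || (rMin != some 1) then false
      else vmOuterA matrix is

def validMatrix (matrix : List (List Int)) : Bool :=
  vmOuterA matrix (List.range matrix.length)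

-- ===== PORT B =====
-- valid(seq): len(set(seq)) == n and min(seq) == 1 and max(seq) == n
def vmValid (n : Nat) (seq : List Int) : Bool :=
  (PySem.Set.len (PySem.Set.ofList seq) == (n : Int)) &&
  (PySem.List.min? seq (fun x => x) == some 1) &&
  (PySem.List.max? seq (fun x => x) == some (n : Int))

def validMatrix_alt (matrix : List (List Int)) : Bool :=
  let n := matrix.length
  let rows := matrix.map (fun row => PySem.List.slice row none (some (n : Int)))  -- row[:n]
  -- [[row[i] for row in rows] for i in range(n)]: under Pre_ every truncated row has length
  -- exactly n, so the index is in range and the default of getD is never used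
  let cols := (List.range n).map (fun i => rows.map (fun row => (row[i]?).getD 0))
  (rows ++ cols).all (vmValid n)

-- ===== PRECONDITION & SPEC =====
-- Pre_ excludes matrices with a row shorter than n = len(matrix): there B's column
-- construction always raises IndexError, while A either raises IndexError too or happens to
-- return False from an earlier row's check before reaching the short row.
def Pre_validMatrix (matrix : List (List Int)) : Prop :=
  ∀ row ∈ matrix, matrix.length ≤ row.length
instance (matrix : List (List Int)) : Decidable (Pre_validMatrix matrix) := by
  unfold Pre_validMatrix; infer_instance

def pvWitness_validMatrix : List (List Int) := [[1, 2], [2, 1]]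

-- On square matrices whose every row and column has min 1 and max n but where some row or
-- column contains a duplicate, A returns True (its rowSet/colSet are never added to, so its
-- duplicate check is dead code) while B returns False, the intended answer: such a line is
-- not a permutation of 1..n.  (L is the n truncated rows followed by the n columns.)
def D_validMatrix (matrix : List (List Int)) : Prop :=
  let n := matrix.length
  let L := matrix.map (List.take n) ++
    (List.range n).map fun i => matrix.map fun r => r.getD i 0
  (∀ s ∈ L, 1 ∈ s ∧ ↑n ∈ s ∧ ∀ x ∈ s, 1 ≤ x ∧ x ≤ ↑n) ∧ ∃ s ∈ L, ¬s.Nodup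
instance (matrix : List (List Int)) : Decidable (D_validMatrix matrix) := by
  unfold D_validMatrix; infer_instance

def Spec_validMatrix (matrix : List (List Int)) (out : Bool) : Prop :=
  ¬ D_validMatrix matrix → out = validMatrix_alt matrix
instance (matrix : List (List Int)) (out : Bool) : Decidable (Spec_validMatrix matrix out) := by
  unfold Spec_validMatrix; infer_instance

def pvDiffWitness_validMatrix : List (List Int) := [[1, 1, 3], [1, 3, 1], [3, 1, 1]]
def pvDiffWitnessOut_validMatrix : Bool × Bool := (true, false)

-- ===== CLAIM (what is proved, stated in full; the proofs are below) =====
def Claim_unchanged_validMatrix : Prop := ∀ (matrix : List (List Int)), Dom_validMatrix matrix → Pre_validMatrix matrix → Spec_validMatrix matrix (validMatrix matrix)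
def Claim_changed_validMatrix : Prop := Dom_validMatrix (pvDiffWitness_validMatrix) ∧ Pre_validMatrix (pvDiffWitness_validMatrix) ∧ D_validMatrix (pvDiffWitness_validMatrix) ∧ validMatrix (pvDiffWitness_validMatrix) = pvDiffWitnessOut_validMatrix.1 ∧ validMatrix_alt (pvDiffWitness_validMatrix) = pvDiffWitnessOut_validMatrix.2 ∧ pvDiffWitnessOut_validMatrix.1 ≠ pvDiffWitnessOut_validMatrix.2
def Claim_exact_validMatrix : Prop := ∀ (matrix : List (List Int)), Dom_validMatrix matrix → Pre_validMatrix matrix → D_validMatrix matrix → validMatrix matrix ≠ validMatrix_alt matrix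

-- ===== LEMMAS AND PROOFS =====

-- the i-th (truncated) row and the i-th column
def vmRow (matrix : List (List Int)) (i : Nat) : List Int :=
  (matrix.getD i []).take matrix.length
def vmCol (matrix : List (List Int)) (i : Nat) : List Int :=
  matrix.map (fun row => (row.take matrix.length).getD i 0)

-- the min/max folds of A's inner loop
def vmFMin (o : Option Int) (l : List Int) : Option Int :=
  l.foldl (fun a e => some (match a with | none => e | some m => min m e)) o
def vmFMax (o : Option Int) (l : List Int) : Option Int :=
  l.foldl (fun a e => some (match a with | none => e | some m => max m e)) o

-- the min/max part of both programs' per-line check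
def vmOkb (n : Nat) (s : List Int) : Bool :=
  (PySem.List.min? s (fun x => x) == some 1) && (PySem.List.max? s (fun x => x) == some (n : Int))

theorem vmMin?_eq (s : List Int) : PySem.List.min? s (fun x => x) = s.min? := by
  cases s <;> simp [PySem.List.min?_id_cons, List.min?]

theorem vmMax?_eq (s : List Int) : PySem.List.max? s (fun x => x) = s.max? := by
  cases s <;> simp [PySem.List.max?_id_cons, List.max?]

theorem vmOkb_iff (n : Nat) (s : List Int) :
    vmOkb n s = true ↔ (s.min? = some 1 ∧ s.max? = some (n : Int)) := by
  simp [vmOkb, vmMin?_eq, vmMax?_eq]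

theorem vmFMin_some (l : List Int) (m : Int) : vmFMin (some m) l = some (l.foldl min m) := by
  induction l generalizing m with
  | nil => rfl
  | cons x t ih => simpa [vmFMin, List.foldl] using ih (min m x)

theorem vmFMax_some (l : List Int) (m : Int) : vmFMax (some m) l = some (l.foldl max m) := by
  induction l generalizing m with
  | nil => rfl
  | cons x t ih => simpa [vmFMax, List.foldl] using ih (max m x)

theorem vmFMin_min? (l : List Int) (h : l ≠ []) :
    vmFMin none l = PySem.List.min? l (fun x => x) := by
  cases l with
  | nil => simp at h
  | cons x t =>
    rw [PySem.List.min?_id_cons]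
    show vmFMin (some x) t = some (t.foldl min x)
    exact vmFMin_some t x

theorem vmFMax_max? (l : List Int) (h : l ≠ []) :
    vmFMax none l = PySem.List.max? l (fun x => x) := by
  cases l with
  | nil => simp at h
  | cons x t =>
    rw [PySem.List.max?_id_cons]
    show vmFMax (some x) t = some (t.foldl max x)
    exact vmFMax_some t x

-- matrix[k][j] under Pre_ and in-range indices
theorem vmIdx (matrix : List (List Int)) (hp : Pre_validMatrix matrix) (k j : Nat)
    (hk : k < matrix.length) (hj : j < matrix.length) :
    matrix[k]?.bind (fun r => r[j]?) = some ((matrix.getD k []).getD j 0) := by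
  have hk' : matrix[k]? = some matrix[k] := List.getElem?_eq_getElem hk
  have hlen : j < matrix[k].length :=
    lt_of_lt_of_le hj (hp _ (List.getElem_mem hk))
  rw [hk', Option.bind_some, List.getD_eq_getElem matrix [] hk,
      List.getD_eq_getElem _ 0 hlen, List.getElem?_eq_getElem hlen]

-- A's inner loop never exits early (the sets stay empty) and computes the four folds
theorem vmInnerA_eq (matrix : List (List Int)) (i : Nat) (js : List Nat)
    (hp : Pre_validMatrix matrix) (hi : i < matrix.length)
    (hjs : ∀ j ∈ js, j < matrix.length)
    (rMin rMax cMin cMax : Option Int) :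
    vmInnerA matrix i js PySem.Set.empty PySem.Set.empty rMin rMax cMin cMax =
      some (vmFMin rMin (js.map (fun j => (matrix.getD i []).getD j 0)),
            vmFMax rMax (js.map (fun j => (matrix.getD i []).getD j 0)),
            vmFMin cMin (js.map (fun j => (matrix.getD j []).getD i 0)),
            vmFMax cMax (js.map (fun j => (matrix.getD j []).getD i 0))) := by
  induction js generalizing rMin rMax cMin cMax with
  | nil => rfl
  | cons j js ih =>
    have hj : j < matrix.length := hjs j (by simp)
    have hc : ∀ e : Int, PySem.Set.contains PySem.Set.empty e = false := fun e => rfl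
    simp only [vmInnerA, vmIdx matrix hp i j hi hj, vmIdx matrix hp j i hj hi, hc,
      Bool.false_eq_true, if_false]
    rw [ih (fun j' hj' => hjs j' (List.mem_cons_of_mem j hj'))]
    simp only [List.map_cons, vmFMin, vmFMax, List.foldl_cons]

-- (range n).map (getD · d) is take n
theorem vmTakeRange (n : Nat) (r : List Int) (h : n ≤ r.length) :
    (List.range n).map (fun j => r.getD j 0) = r.take n := by
  apply List.ext_getElem (by simp; omega)
  intro i h1 h2
  simp only [List.length_map, List.length_range] at h1
  have hir : i < r.length := lt_of_lt_of_le h1 h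
  simp [List.getElem?_eq_getElem hir]

-- map over a list as a map over its index range
theorem vmMapRange {α β : Type} (l : List α) (f : α → β) (d : α) :
    l.map f = (List.range l.length).map (fun i => f (l.getD i d)) := by
  apply List.ext_getElem (by simp)
  intro i h1 h2
  simp only [List.length_map] at h1
  simp [List.getElem?_eq_getElem h1]

theorem vmColElems (matrix : List (List Int)) (i : Nat) (hi : i < matrix.length) :
    (List.range matrix.length).map (fun j => (matrix.getD j []).getD i 0) =
      vmCol matrix i := by
  rw [vmCol, vmMapRange matrix _ []]
  apply List.map_congr_left
  intro j _
  simp [List.getD_eq_getElem?_getD, List.getElem?_take_of_lt hi]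

theorem vmRow_length (matrix : List (List Int)) (hp : Pre_validMatrix matrix) (i : Nat)
    (hi : i < matrix.length) : (vmRow matrix i).length = matrix.length := by
  have hr : matrix.length ≤ (matrix.getD i []).length := by
    rw [List.getD_eq_getElem matrix [] hi]
    exact hp _ (List.getElem_mem hi)
  rw [vmRow, List.length_take, Nat.min_eq_left hr]

theorem vmCol_length (matrix : List (List Int)) (i : Nat) :
    (vmCol matrix i).length = matrix.length := by simp [vmCol]

-- A's outer loop is an 'all' of per-index checks
theorem vmOuterA_eq (matrix : List (List Int)) (is : List Nat)
    (hp : Pre_validMatrix matrix) (his : ∀ i ∈ is, i < matrix.length) :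
    vmOuterA matrix is =
      is.all (fun i => vmOkb matrix.length (vmRow matrix i) &&
                       vmOkb matrix.length (vmCol matrix i)) := by
  induction is with
  | nil => rfl
  | cons i is ih =>
    have hi : i < matrix.length := his i (by simp)
    have hrl : matrix.length ≤ (matrix.getD i []).length := by
      rw [List.getD_eq_getElem matrix [] hi]
      exact hp _ (List.getElem_mem hi)
    have hrow : (List.range matrix.length).map (fun j => (matrix.getD i []).getD j 0) =
        vmRow matrix i := vmTakeRange _ _ hrl
    have hrne : vmRow matrix i ≠ [] := by
      have := vmRow_length matrix hp i hi
      intro hnil; rw [hnil] at this; simp at this; omega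
    have hcne : vmCol matrix i ≠ [] := by
      have := vmCol_length matrix i
      intro hnil; rw [hnil] at this; simp at this; omega
    have hbool : ∀ (p q u v r : Bool),
        (if (!v || !q || !u || !p) then false else r) = (((p && q) && (u && v)) && r) := by
      decide
    simp only [vmOuterA,
      vmInnerA_eq matrix i (List.range matrix.length) hp hi
        (fun j hj => List.mem_range.mp hj) none none none none,
      hrow, vmColElems matrix i hi,
      vmFMin_min? _ hrne, vmFMax_max? _ hrne, vmFMin_min? _ hcne, vmFMax_max? _ hcne]
    rw [ih (fun i' hi' => his i' (List.mem_cons_of_mem i hi'))]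
    simp only [List.all_cons, bne, hbool, vmOkb]

theorem vmAllCongr {α : Type} (l : List α) (p q : α → Bool) (h : ∀ x ∈ l, p x = q x) :
    l.all p = l.all q := by
  induction l with
  | nil => rfl
  | cons x t ih =>
    rw [List.all_cons, List.all_cons, h x (by simp),
      ih (fun y hy => h y (List.mem_cons_of_mem x hy))]

theorem vmAllAnd {α : Type} (l : List α) (p q : α → Bool) :
    l.all (fun x => p x && q x) = (l.all p && l.all q) := by
  induction l with
  | nil => rfl
  | cons x t ih =>
    simp only [List.all_cons, ih]
    cases p x <;> cases q x <;> simp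

theorem vmAllRange {α : Type} (l : List α) (p : α → Bool) (d : α) :
    l.all p = (List.range l.length).all (fun i => p (l.getD i d)) := by
  rw [Bool.eq_iff_iff, List.all_eq_true, List.all_eq_true]
  constructor
  · intro h i hi
    rw [List.mem_range] at hi
    rw [List.getD_eq_getElem l d hi]
    exact h _ (List.getElem_mem hi)
  · intro h x hx
    obtain ⟨i, hi, rfl⟩ := List.mem_iff_getElem.mp hx
    have := h i (List.mem_range.mpr hi)
    rwa [List.getD_eq_getElem l d hi] at this

theorem vmGetD_map {α β : Type} (l : List α) (f : α → β) (i : Nat) (d : α) (d' : β)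
    (h : i < l.length) : (l.map f).getD i d' = f (l.getD i d) := by
  rw [List.getD_eq_getElem _ d' (by simpa using h), List.getD_eq_getElem _ d h,
    List.getElem_map]

-- characterization of A
theorem validMatrix_char (matrix : List (List Int)) (hp : Pre_validMatrix matrix) :
    validMatrix matrix =
      ((List.range matrix.length).all (fun i => vmOkb matrix.length (vmRow matrix i)) &&
       (List.range matrix.length).all (fun i => vmOkb matrix.length (vmCol matrix i))) := by
  rw [validMatrix, vmOuterA_eq matrix _ hp (fun i hi => List.mem_range.mp hi), vmAllAnd]

-- the set-size test of B's valid(seq) is a Nodup test on lines of length n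
theorem vmOfListAppend {α : Type} [BEq α] [LawfulBEq α] :
    ∀ (s acc : List α), ∃ t : List α,
      List.foldl PySem.Set.add acc s = acc ++ t ∧ t.Sublist s := by
  intro s
  induction s with
  | nil => exact fun acc => ⟨[], by simp, List.nil_sublist []⟩
  | cons x xs ih =>
    intro acc
    by_cases hx : PySem.Set.contains acc x = true
    · obtain ⟨t, ht, hs⟩ := ih acc
      refine ⟨t, ?_, hs.cons x⟩
      have hmem : x ∈ acc := by simpa [PySem.Set.contains] using hx
      have hadd : PySem.Set.add acc x = acc := by simp [PySem.Set.add, PySem.Set.contains, hmem]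
      rw [List.foldl_cons, hadd]
      exact ht
    · obtain ⟨t, ht, hs⟩ := ih (acc ++ [x])
      refine ⟨x :: t, ?_, hs.cons₂ x⟩
      have hmem : x ∉ acc := by simpa [PySem.Set.contains] using hx
      have hadd : PySem.Set.add acc x = acc ++ [x] := by simp [PySem.Set.add, PySem.Set.contains, hmem]
      rw [List.foldl_cons, hadd, ht, List.append_assoc]
      rfl

theorem vmLenNodup {α : Type} [BEq α] [LawfulBEq α] (s : List α) :
    (PySem.Set.ofList s).length = s.length ↔ s.Nodup := by
  obtain ⟨t, ht, hs⟩ := vmOfListAppend s []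
  have hof : PySem.Set.ofList s = t := by
    simpa [PySem.Set.ofList, PySem.Set.empty] using ht
  constructor
  · intro hlen
    have hts : t = s := hs.eq_of_length (by rw [← hof, hlen])
    have := PySem.Set.nodup_ofList s
    rwa [hof, hts] at this
  · intro hnd
    have hsub : s ⊆ PySem.Set.ofList s := fun x hx => (PySem.Set.mem_ofList s x).mpr hx
    have h1 : s.length ≤ (PySem.Set.ofList s).length := (hnd.subperm hsub).length_le
    have h2 : (PySem.Set.ofList s).length ≤ s.length := by rw [hof]; exact hs.length_le
    omega

theorem vmValid_eq (n : Nat) (s : List Int) (hlen : s.length = n) :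
    vmValid n s = (decide s.Nodup && vmOkb n s) := by
  have hset : (PySem.Set.len (PySem.Set.ofList s) == (n : Int)) = decide s.Nodup := by
    rw [PySem.Set.len_eq, Bool.eq_iff_iff, beq_iff_eq, decide_eq_true_iff]
    constructor
    · intro h
      exact (vmLenNodup s).mp (by omega)
    · intro h
      rw [(vmLenNodup s).mpr h, hlen]
  rw [vmValid, vmOkb, hset, Bool.and_assoc]

-- characterization of B
theorem validMatrix_alt_char (matrix : List (List Int)) (hp : Pre_validMatrix matrix) :
    validMatrix_alt matrix =
      ((List.range matrix.length).all (fun i =>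
          (decide (vmRow matrix i).Nodup && vmOkb matrix.length (vmRow matrix i))) &&
       (List.range matrix.length).all (fun i =>
          (decide (vmCol matrix i).Nodup && vmOkb matrix.length (vmCol matrix i)))) := by
  simp only [validMatrix_alt, PySem.List.slice_to_natCast, List.all_append]
  congr 1
  · rw [vmAllRange _ _ []]
    simp only [List.length_map]
    apply vmAllCongr
    intro i hi
    rw [List.mem_range] at hi
    rw [vmGetD_map matrix _ i [] [] hi]
    exact vmValid_eq _ _ (vmRow_length matrix hp i hi)
  · rw [List.all_map]
    apply vmAllCongr
    intro i hi
    rw [List.mem_range] at hi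
    have hcol : (matrix.map (List.take matrix.length)).map (fun row => (row[i]?).getD 0) =
        vmCol matrix i := by
      rw [List.map_map, vmCol]
      apply List.map_congr_left
      intro row _
      simp [List.getD_eq_getElem?_getD]
    show vmValid matrix.length ((matrix.map (List.take matrix.length)).map
        (fun row => (row[i]?).getD 0)) = _
    rw [hcol]
    exact vmValid_eq _ _ (vmCol_length matrix i)

-- both programs' min/max test on a line, as membership plus bounds
theorem vmOkb_iff' (n : Nat) (s : List Int) :
    vmOkb n s = true ↔
      (1 ∈ s ∧ (n : Int) ∈ s ∧ ∀ x ∈ s, 1 ≤ x ∧ x ≤ (n : Int)) := by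
  rw [vmOkb_iff, List.min?_eq_some_iff_subtype, List.max?_eq_some_iff]
  constructor
  · rintro ⟨⟨h1, hlb⟩, hz, hub⟩
    exact ⟨h1, hz, fun x hx => ⟨hlb x hx, hub x hx⟩⟩
  · rintro ⟨h1, hz, hb⟩
    exact ⟨⟨h1, fun x hx => (hb x hx).1⟩, hz, fun x hx => (hb x hx).2⟩

theorem D_iff (matrix : List (List Int)) :
    D_validMatrix matrix ↔
      ((∀ i, i < matrix.length → vmOkb matrix.length (vmRow matrix i) = true ∧
                                 vmOkb matrix.length (vmCol matrix i) = true) ∧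
       (∃ i, i < matrix.length ∧ (¬ (vmRow matrix i).Nodup ∨ ¬ (vmCol matrix i).Nodup))) := by
  have hcol' : ∀ i, i < matrix.length →
      (matrix.map fun r => r.getD i 0) = vmCol matrix i := by
    intro i hi
    unfold vmCol
    apply List.map_congr_left
    intro r _
    simp [List.getD_eq_getElem?_getD, List.getElem?_take_of_lt hi]
  have hmemL : ∀ s : List Int,
      (s ∈ matrix.map (List.take matrix.length) ++
        (List.range matrix.length).map fun i => matrix.map fun r => r.getD i 0) ↔
      ∃ i, i < matrix.length ∧ (s = vmRow matrix i ∨ s = vmCol matrix i) := by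
    intro s
    simp only [List.mem_append, List.mem_map, List.mem_range]
    constructor
    · rintro (⟨row, hrow, rfl⟩ | ⟨i, hi, rfl⟩)
      · obtain ⟨i, hi, rfl⟩ := List.mem_iff_getElem.mp hrow
        exact ⟨i, hi, Or.inl (by unfold vmRow; rw [List.getD_eq_getElem matrix [] hi])⟩
      · exact ⟨i, hi, Or.inr (hcol' i hi)⟩
    · rintro ⟨i, hi, rfl | rfl⟩
      · refine Or.inl ⟨matrix.getD i [], ?_, rfl⟩
        rw [List.getD_eq_getElem matrix [] hi]
        exact List.getElem_mem hi
      · exact Or.inr ⟨i, hi, hcol' i hi⟩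
  simp only [D_validMatrix]
  constructor
  · rintro ⟨h1, h2⟩
    refine ⟨fun i hi => ⟨?_, ?_⟩, ?_⟩
    · rw [vmOkb_iff']; exact h1 _ ((hmemL _).mpr ⟨i, hi, Or.inl rfl⟩)
    · rw [vmOkb_iff']; exact h1 _ ((hmemL _).mpr ⟨i, hi, Or.inr rfl⟩)
    · obtain ⟨t, ht, hnd⟩ := h2
      obtain ⟨i, hi, hor⟩ := (hmemL t).mp ht
      refine ⟨i, hi, ?_⟩
      cases hor with
      | inl h => exact Or.inl (h ▸ hnd)
      | inr h => exact Or.inr (h ▸ hnd)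
  · rintro ⟨h1, i, hi, hor⟩
    constructor
    · intro t ht
      obtain ⟨j, hj, hjor⟩ := (hmemL t).mp ht
      cases hjor with
      | inl h => subst h; exact (vmOkb_iff' _ _).mp (h1 j hj).1
      | inr h => subst h; exact (vmOkb_iff' _ _).mp (h1 j hj).2
    · cases hor with
      | inl h => exact ⟨_, (hmemL _).mpr ⟨i, hi, Or.inl rfl⟩, h⟩
      | inr h => exact ⟨_, (hmemL _).mpr ⟨i, hi, Or.inr rfl⟩, h⟩

-- ===== VERDICT (by name: the statement is the Claim_ definition above) =====
theorem validMatrix_spec : Claim_unchanged_validMatrix := by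
  intro matrix _ hpre hD
  rw [validMatrix_char matrix hpre, validMatrix_alt_char matrix hpre,
    Bool.eq_iff_iff]
  simp only [Bool.and_eq_true, List.all_eq_true, List.mem_range, decide_eq_true_eq]
  constructor
  · rintro ⟨hr, hc⟩
    have hok : ∀ i, i < matrix.length →
        vmOkb matrix.length (vmRow matrix i) = true ∧
        vmOkb matrix.length (vmCol matrix i) = true :=
      fun i hi => ⟨hr i hi, hc i hi⟩
    have hnd : ∀ i, i < matrix.length →
        (vmRow matrix i).Nodup ∧ (vmCol matrix i).Nodup := by
      intro i hi
      by_contra hcon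
      apply hD
      rw [D_iff matrix]
      refine ⟨hok, i, hi, ?_⟩
      tauto
    exact ⟨fun i hi => ⟨(hnd i hi).1, hr i hi⟩, fun i hi => ⟨(hnd i hi).2, hc i hi⟩⟩
  · rintro ⟨hr, hc⟩
    exact ⟨fun i hi => (hr i hi).2, fun i hi => (hc i hi).2⟩

theorem validMatrix_changed : Claim_changed_validMatrix := by
  unfold Claim_changed_validMatrix; decide

theorem validMatrix_tight : Claim_exact_validMatrix := by
  intro matrix _ hpre hD
  rw [D_iff matrix] at hD
  obtain ⟨hok, i, hi, hdup⟩ := hD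
  rw [validMatrix_char matrix hpre, validMatrix_alt_char matrix hpre]
  have hA : ((List.range matrix.length).all
        (fun i => vmOkb matrix.length (vmRow matrix i)) &&
      (List.range matrix.length).all
        (fun i => vmOkb matrix.length (vmCol matrix i))) = true := by
    simp only [Bool.and_eq_true, List.all_eq_true, List.mem_range]
    exact ⟨fun j hj => (hok j hj).1, fun j hj => (hok j hj).2⟩
  rw [hA]
  intro hcon
  have hB := hcon.symm
  simp only [Bool.and_eq_true, List.all_eq_true, List.mem_range, decide_eq_true_eq] at hB
  cases hdup with
  | inl h => exact h (hB.1 i hi).1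
  | inr h => exact h (hB.2 i hi).1
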